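-- pv_equiv track=rewrite | github.com/NathanNarrik/villagehacks | backend/scripts/run_benchmark.py | _error_hypothesis_indices
-- ===== SOURCE A (Python) =====
-- from typing import Any, Sequence
--
-- def _error_hypothesis_indices(reference: Sequence[str], hypothesis: Sequence[str]) -> set[int]:
--     rows = len(reference)
--     cols = len(hypothesis)
--     dp = [[0] * (cols + 1) for _ in range(rows + 1)]
--
--     for i in range(rows + 1):
--         dp[i][0] = i
--     for j in range(cols + 1):
--         dp[0][j] = j
--
--     for i, ref_tok in enumerate(reference, start=1):
--         for j, hyp_tok in enumerate(hypothesis, start=1):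
--             cost = 0 if ref_tok == hyp_tok else 1
--             dp[i][j] = min(
--                 dp[i - 1][j] + 1,
--                 dp[i][j - 1] + 1,
--                 dp[i - 1][j - 1] + cost,
--             )
--
--     i = rows
--     j = cols
--     hypothesis_error_indices: set[int] = set()
--     while i > 0 or j > 0:
--         if i > 0 and j > 0:
--             cost = 0 if reference[i - 1] == hypothesis[j - 1] else 1
--             if dp[i][j] == dp[i - 1][j - 1] + cost:
--                 if cost:
--                     hypothesis_error_indices.add(j - 1)
--                 i -= 1
--                 j -= 1
--                 continue
--         if j > 0 and dp[i][j] == dp[i][j - 1] + 1: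
--             hypothesis_error_indices.add(j - 1)
--             j -= 1
--             continue
--         if i > 0 and dp[i][j] == dp[i - 1][j] + 1:
--             i -= 1
--             continue
--         break
--
--     return hypothesis_error_indices
-- ===== SOURCE B (Python) =====
-- def _error_hypothesis_indices(reference, hypothesis):
--     # Single forward pass: each cell carries (distance, errors), where errors is a
--     # persistent cons-list (index, tail) of the hypothesis positions the canonical
--     # optimal alignment edits.  The answer is shared/extended during the fill and
--     # read off the last cell; no dp matrix is stored and there is no backtracking
--     # phase.  Matching tokens take a fast path that copies the diagonal cell.
--     cols = len(hypothesis)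
--     prev = [(0, None)]
--     for j in range(1, cols + 1):
--         prev.append((j, (j - 1, prev[j - 1][1])))
--     for i, tok in enumerate(reference, start=1):
--         cur = [(i, None)]
--         for j, hyp in enumerate(hypothesis, start=1):
--             d_dist, d_err = prev[j - 1]
--             if tok == hyp:
--                 cur.append((d_dist, d_err))
--                 continue
--             u_dist, u_err = prev[j]
--             l_dist, l_err = cur[j - 1]
--             best = min(d_dist, l_dist, u_dist) + 1
--             if best == d_dist + 1:
--                 cur.append((best, (j - 1, d_err)))
--             elif best == l_dist + 1:
--                 cur.append((best, (j - 1, l_err)))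
--             else:
--                 cur.append((best, u_err))
--         prev = cur
--     out = set()
--     node = prev[cols][1]
--     while node is not None:
--         out.add(node[0])
--         node = node[1]
--     return out
-- ===== Notes on version B (the rewrite author's own statement) =====
-- stated objective: alternative
-- what changed: B eliminates A's dp matrix and its whole value-comparison backtracking phase: it makes a single forward pass keeping only one row of (distance, error-list) pairs, where the error list of the canonical alignment is built incrementally as a shared persistent cons-list (with a fast path copying the diagonal cell on token match), and the answer is read directly off the last cell.
import Mathlib
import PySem

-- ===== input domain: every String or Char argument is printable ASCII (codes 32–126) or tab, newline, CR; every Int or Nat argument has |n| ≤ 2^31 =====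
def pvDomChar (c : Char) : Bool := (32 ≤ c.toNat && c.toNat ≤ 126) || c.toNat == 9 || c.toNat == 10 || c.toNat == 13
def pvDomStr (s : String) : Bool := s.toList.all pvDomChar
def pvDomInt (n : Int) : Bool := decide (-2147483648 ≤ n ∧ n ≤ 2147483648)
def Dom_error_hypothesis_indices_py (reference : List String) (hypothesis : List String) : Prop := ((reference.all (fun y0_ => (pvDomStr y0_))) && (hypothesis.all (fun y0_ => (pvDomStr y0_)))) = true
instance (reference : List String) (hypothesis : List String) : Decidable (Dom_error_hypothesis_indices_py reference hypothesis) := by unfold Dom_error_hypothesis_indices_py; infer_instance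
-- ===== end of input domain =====

-- B drops A's dp matrix and its whole backtracking phase: one forward pass over
-- a single row of (distance, error-list) pairs, sharing the error lists, and the
-- answer is read off the last cell; objective: alternative (same output).

-- ===== PORT A =====
-- dp is a list of rows exactly as in Python; pvGet2/pvSet2 are the cell
-- read/write dp[i][j] (indices here are always in range, so getD/set are exact),
-- and the enumerate loops are ported as index loops reading the same tokens.
def pvGet2 (m : List (List Int)) (i j : Nat) : Int := (m.getD i []).getD j 0

def pvSet2 (m : List (List Int)) (i j : Nat) (v : Int) : List (List Int) :=
  m.set i ((m.getD i []).set j v)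

-- body of A's inner fill loop (i = im+1, j = jm+1)
def pvFillCell (reference hypothesis : List String) (im : Nat)
    (m : List (List Int)) (jm : Nat) : List (List Int) :=
  let i := im + 1
  let j := jm + 1
  let cost : Int := if reference.getD im "" = hypothesis.getD jm "" then 0 else 1
  pvSet2 m i j (min (min (pvGet2 m (i-1) j + 1) (pvGet2 m i (j-1) + 1))
    (pvGet2 m (i-1) (j-1) + cost))

def pvFillRow (reference hypothesis : List String)
    (m : List (List Int)) (im : Nat) : List (List Int) :=
  (List.range hypothesis.length).foldl (pvFillCell reference hypothesis im) m

def pvFill (reference hypothesis : List String) (m : List (List Int)) : List (List Int) :=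
  (List.range reference.length).foldl (pvFillRow reference hypothesis) m

-- A's while-loop backtrack; the fall-through after a failed diagonal test is
-- written out in both arms (Python reaches the same two ifs either way).
def pvABack (dp : List (List Int)) (reference hypothesis : List String) :
    Nat → Nat → PySem.Set Int → PySem.Set Int := fun i j s =>
  if _h1 : i > 0 ∨ j > 0 then
    if h2 : i > 0 ∧ j > 0 then
      let cost : Int := if reference.getD (i-1) "" = hypothesis.getD (j-1) "" then 0 else 1
      if pvGet2 dp i j = pvGet2 dp (i-1) (j-1) + cost then
        pvABack dp reference hypothesis (i-1) (j-1)
          (if cost ≠ 0 then PySem.Set.add s ((j:Int)-1) else s)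
      else if h3 : j > 0 ∧ pvGet2 dp i j = pvGet2 dp i (j-1) + 1 then
        pvABack dp reference hypothesis i (j-1) (PySem.Set.add s ((j:Int)-1))
      else if h4 : i > 0 ∧ pvGet2 dp i j = pvGet2 dp (i-1) j + 1 then
        pvABack dp reference hypothesis (i-1) j s
      else s
    else if h3 : j > 0 ∧ pvGet2 dp i j = pvGet2 dp i (j-1) + 1 then
      pvABack dp reference hypothesis i (j-1) (PySem.Set.add s ((j:Int)-1))
    else if h4 : i > 0 ∧ pvGet2 dp i j = pvGet2 dp (i-1) j + 1 then
      pvABack dp reference hypothesis (i-1) j s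
    else s
  else s
termination_by i j _ => i + j
decreasing_by all_goals omega

def error_hypothesis_indices_py (reference : List String) (hypothesis : List String) : List Int :=
  let rows := reference.length
  let cols := hypothesis.length
  let dp0 : List (List Int) := List.replicate (rows+1) (List.replicate (cols+1) 0)
  let dp1 := (List.range (rows+1)).foldl (fun m i => pvSet2 m i 0 (i:Int)) dp0
  let dp2 := (List.range (cols+1)).foldl (fun m j => pvSet2 m 0 j (j:Int)) dp1
  let dp := pvFill reference hypothesis dp2
  pvABack dp reference hypothesis rows cols PySem.Set.empty

-- ===== PORT B =====
-- a cell is (distance, error cons-list); Python's persistent (head, tail) nodes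
-- are Lean lists (same sharing); prev[j]/cur[j] reads are in range, so getD is exact.
-- Source B's first loop: prev = [(0, None)]; for j in 1..cols append (j, (j-1, prev[j-1][1]))
def pvInitRowB (cols : Nat) : List (Int × List Int) :=
  (List.range' 1 cols).foldl
    (fun (prev : List (Int × List Int)) (j : Nat) =>
      prev ++ [((j : Int), ((j : Int) - 1) :: (prev.getD (j-1) (0, [])).2)])
    [((0 : Int), ([] : List Int))]

-- body of Source B's inner loop (j = jm+1)
def pvRowBCell (hypothesis : List String) (tok : String)
    (prev : List (Int × List Int)) (cur : List (Int × List Int)) (jm : Nat) :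
    List (Int × List Int) :=
  let j := jm + 1
  let d := prev.getD (j-1) (0, [])
  if tok = hypothesis.getD jm "" then cur ++ [d]
  else
    let u := prev.getD j (0, [])
    let l := cur.getD (j-1) (0, [])
    let best := min (min d.1 l.1) u.1 + 1
    if best = d.1 + 1 then cur ++ [(best, ((j : Int) - 1) :: d.2)]
    else if best = l.1 + 1 then cur ++ [(best, ((j : Int) - 1) :: l.2)]
    else cur ++ [(best, u.2)]

def error_hypothesis_indices_py_alt (reference : List String) (hypothesis : List String) : List Int :=
  let cols := hypothesis.length
  let prevF := (PySem.List.enumerate reference 1).foldl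
    (fun prev (p : Int × String) =>
      (List.range hypothesis.length).foldl (pvRowBCell hypothesis p.2 prev)
        [(p.1, ([] : List Int))])
    (pvInitRowB cols)
  -- the final while loop materialises the cons-list into the result set, head first
  ((prevF.getD cols (0, [])).2).foldl PySem.Set.add PySem.Set.empty

-- ===== PRECONDITION & SPEC =====
def Spec_error_hypothesis_indices_py (reference : List String) (hypothesis : List String) (out : List Int) : Prop := out = error_hypothesis_indices_py_alt reference hypothesis
instance (reference : List String) (hypothesis : List String) (out : List Int) : Decidable (Spec_error_hypothesis_indices_py reference hypothesis out) := by unfold Spec_error_hypothesis_indices_py; infer_instance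

-- ===== CLAIM (what is proved, stated in full; the proofs are below) =====
def Claim_equal_error_hypothesis_indices_py : Prop := ∀ (reference : List String) (hypothesis : List String), Dom_error_hypothesis_indices_py reference hypothesis → Spec_error_hypothesis_indices_py reference hypothesis (error_hypothesis_indices_py reference hypothesis)

-- ===== LEMMAS AND PROOFS =====

-- the Levenshtein dp value at cell (i, j)
def pvD (reference hypothesis : List String) : Nat → Nat → Int
  | 0, j => (j : Int)
  | i+1, 0 => ((i : Int) + 1)
  | i+1, j+1 =>
    min (min (pvD reference hypothesis i (j+1) + 1)
             (pvD reference hypothesis (i+1) j + 1))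
        (pvD reference hypothesis i j +
          (if reference.getD i "" = hypothesis.getD j "" then (0:Int) else 1))
termination_by i j => i + j

-- the error list B stores at cell (i, j), in A's traceback (= add) order
def pvE (reference hypothesis : List String) : Nat → Nat → List Int
  | 0, 0 => []
  | 0, j+1 => (j : Int) :: pvE reference hypothesis 0 j
  | _+1, 0 => []
  | i+1, j+1 =>
    if reference.getD i "" = hypothesis.getD j "" then pvE reference hypothesis i j
    else
      let best := min (min (pvD reference hypothesis i j)
          (pvD reference hypothesis (i+1) j)) (pvD reference hypothesis i (j+1)) + 1
      if best = pvD reference hypothesis i j + 1 then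
        (j : Int) :: pvE reference hypothesis i j
      else if best = pvD reference hypothesis (i+1) j + 1 then
        (j : Int) :: pvE reference hypothesis (i+1) j
      else pvE reference hypothesis i (j+1)
termination_by i j => i + j

-- the table stays rectangular
def pvRect (m : List (List Int)) (rows cols : Nat) : Prop :=
  m.length = rows+1 ∧ ∀ r ∈ m, r.length = cols+1

lemma pvRect_set2 {m : List (List Int)} {rows cols : Nat} (h : pvRect m rows cols)
    {i : Nat} (hi : i ≤ rows) (j : Nat) (v : Int) : pvRect (pvSet2 m i j v) rows cols := by
  obtain ⟨hlen, hrow⟩ := h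
  have hilt : i < m.length := by omega
  refine ⟨by simp [pvSet2, hlen], ?_⟩
  intro r hr
  rcases List.mem_or_eq_of_mem_set hr with hr' | rfl
  · exact hrow r hr'
  · rw [List.length_set, List.getD_eq_getElem m [] hilt]
    exact hrow m[i] (List.getElem_mem hilt)

lemma pvGet2_set2 {m : List (List Int)} {rows cols : Nat} (h : pvRect m rows cols)
    {i j : Nat} (hi : i ≤ rows) (hj : j ≤ cols) (v : Int) (i' j' : Nat) :
    pvGet2 (pvSet2 m i j v) i' j' = if i' = i ∧ j' = j then v else pvGet2 m i' j' := by
  obtain ⟨hlen, hrow⟩ := h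
  have hilt : i < m.length := by omega
  have hgi : m.getD i [] = m[i] := List.getD_eq_getElem m [] hilt
  have hjlt : j < (m.getD i []).length := by
    rw [hgi, hrow m[i] (List.getElem_mem hilt)]; omega
  have hset : (pvSet2 m i j v).getD i [] = (m.getD i []).set j v := by
    simp [pvSet2, List.getD_eq_getElem?_getD, List.getElem?_set_self hilt]
  by_cases hii : i' = i
  · subst hii
    have key : ∀ j'', pvGet2 (pvSet2 m i' j v) i' j'' = ((m.getD i' []).set j v).getD j'' 0 := by
      intro j''; unfold pvGet2; rw [hset]
    by_cases hjj : j' = j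
    · subst hjj
      rw [key, List.getD_eq_getElem?_getD, List.getElem?_set_self hjlt]
      simp
    · rw [key, List.getD_eq_getElem?_getD, List.getElem?_set_ne (fun h => hjj h.symm),
        ← List.getD_eq_getElem?_getD]
      simp [pvGet2, hjj]
  · have h1 : (pvSet2 m i j v).getD i' [] = m.getD i' [] := by
      unfold pvSet2
      simp [List.getD_eq_getElem?_getD, List.getElem?_set_ne (fun h => hii h.symm)]
    unfold pvGet2
    rw [h1]
    simp [hii]

lemma pvD_zero (r h : List String) (j : Nat) : pvD r h 0 j = (j : Int) := by
  rw [pvD]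

lemma pvD_succ_zero (r h : List String) (i : Nat) : pvD r h (i+1) 0 = ((i : Int) + 1) := by
  rw [pvD]

lemma pvD_col0 (r h : List String) (i : Nat) : pvD r h i 0 = (i : Int) := by
  cases i with
  | zero => rw [pvD_zero]
  | succ n => rw [pvD_succ_zero]; push_cast; ring

lemma pvD_succ_succ (r h : List String) (i j : Nat) :
    pvD r h (i+1) (j+1)
      = min (min (pvD r h i (j+1) + 1) (pvD r h (i+1) j + 1))
          (pvD r h i j + (if r.getD i "" = h.getD j "" then (0:Int) else 1)) := by
  rw [pvD]

lemma pvE_zero_zero (r h : List String) : pvE r h 0 0 = [] := by rw [pvE]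

lemma pvE_zero_succ (r h : List String) (j : Nat) :
    pvE r h 0 (j+1) = (j : Int) :: pvE r h 0 j := by rw [pvE]

lemma pvE_succ_zero (r h : List String) (i : Nat) : pvE r h (i+1) 0 = [] := by rw [pvE]

lemma pvE_col0 (r h : List String) (i : Nat) : pvE r h i 0 = [] := by
  cases i with
  | zero => rw [pvE_zero_zero]
  | succ n => rw [pvE_succ_zero]

lemma pvE_succ_succ (r h : List String) (i j : Nat) :
    pvE r h (i+1) (j+1)
      = if r.getD i "" = h.getD j "" then pvE r h i j
        else if min (min (pvD r h i j) (pvD r h (i+1) j)) (pvD r h i (j+1)) + 1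
                = pvD r h i j + 1 then (j : Int) :: pvE r h i j
        else if min (min (pvD r h i j) (pvD r h (i+1) j)) (pvD r h i (j+1)) + 1
                = pvD r h (i+1) j + 1 then (j : Int) :: pvE r h (i+1) j
        else pvE r h i (j+1) := by
  rw [pvE]

-- |i - j| ≤ pvD i j  (lower bound, used at the boundary of the adjacency lemmas)
lemma pvD_lb (r h : List String) : ∀ (n i j : Nat), i + j ≤ n →
    (i : Int) - j ≤ pvD r h i j ∧ (j : Int) - i ≤ pvD r h i j := by
  intro n
  induction n with
  | zero =>
    intro i j hn
    have hi : i = 0 := by omega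
    have hj : j = 0 := by omega
    subst hi; subst hj
    rw [pvD_zero]; omega
  | succ n ih =>
    intro i j hn
    match i, j with
    | 0, j => rw [pvD_zero]; constructor <;> omega
    | i+1, 0 => rw [pvD_succ_zero]; constructor <;> push_cast <;> omega
    | i+1, j+1 =>
      have h1 := ih i (j+1) (by omega)
      have h2 := ih (i+1) j (by omega)
      have h3 := ih i j (by omega)
      rw [pvD_succ_succ]
      split_ifs <;> push_cast at * <;> omega

-- adjacent dp cells differ by at most one (row direction)
lemma pvD_row_adj (r h : List String) : ∀ (n i j : Nat), i + j ≤ n →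
    pvD r h i j ≤ pvD r h i (j+1) + 1 := by
  intro n
  induction n with
  | zero =>
    intro i j hn
    have hi : i = 0 := by omega
    have hj : j = 0 := by omega
    subst hi; subst hj
    rw [pvD_zero, pvD_zero]; omega
  | succ n ih =>
    intro i j hn
    match i, j with
    | 0, j => rw [pvD_zero, pvD_zero]; omega
    | i+1, 0 =>
      have hlb := (pvD_lb r h (i+1) i 1 (by omega)).1
      have e : pvD r h (i+1) 1
          = min (min (pvD r h i 1 + 1) (pvD r h (i+1) 0 + 1))
              (pvD r h i 0 + (if r.getD i "" = h.getD 0 "" then (0:Int) else 1)) :=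
        pvD_succ_succ r h i 0
      have e0 : pvD r h (i+1) 0 = (i : Int) + 1 := pvD_succ_zero r h i
      have e1 : pvD r h i 0 = (i : Int) := pvD_col0 r h i
      show pvD r h (i+1) 0 ≤ pvD r h (i+1) 1 + 1
      push_cast at hlb
      split_ifs at e <;> omega
    | i+1, j+1 =>
      have ih1 := ih i (j+1) (by omega)
      have e1 := pvD_succ_succ r h i j
      have e2 := pvD_succ_succ r h i (j+1)
      split_ifs at e1 e2 <;> omega

-- adjacent dp cells differ by at most one (column direction)
lemma pvD_col_adj (r h : List String) : ∀ (n i j : Nat), i + j ≤ n →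
    pvD r h i j ≤ pvD r h (i+1) j + 1 := by
  intro n
  induction n with
  | zero =>
    intro i j hn
    have hi : i = 0 := by omega
    have hj : j = 0 := by omega
    subst hi; subst hj
    rw [pvD_zero, pvD_succ_zero]; omega
  | succ n ih =>
    intro i j hn
    match i, j with
    | i, 0 => rw [pvD_col0, pvD_col0]; push_cast; omega
    | 0, j+1 =>
      have hlb := (pvD_lb r h (j+2) 1 (j+1) (by omega)).2
      show pvD r h 0 (j+1) ≤ pvD r h 1 (j+1) + 1
      rw [pvD_zero]
      omega
    | i+1, j+1 =>
      have ih1 := ih (i+1) j (by omega)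
      have e1 := pvD_succ_succ r h i j
      have e2 := pvD_succ_succ r h (i+1) j
      split_ifs at e1 e2 <;> omega

-- on a token match the dp value is exactly the diagonal one
lemma pvD_diag_eq (r h : List String) (i j : Nat) (heq : r.getD i "" = h.getD j "") :
    pvD r h (i+1) (j+1) = pvD r h i j := by
  have h1 := pvD_row_adj r h (i + j + 1) i j (by omega)
  have h2 := pvD_col_adj r h (i + j + 1) i j (by omega)
  have e := pvD_succ_succ r h i j
  rw [if_pos heq] at e
  omega

-- on a token mismatch the dp value is 1 + min of the three neighbours
lemma pvD_mismatch (r h : List String) (i j : Nat) (hne : ¬ r.getD i "" = h.getD j "") :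
    pvD r h (i+1) (j+1)
      = min (min (pvD r h i j) (pvD r h (i+1) j)) (pvD r h i (j+1)) + 1 := by
  have e := pvD_succ_succ r h i j
  rw [if_neg hne] at e
  omega

-- the table initialisation lemmas (A side)
lemma pvInit1 (n : Nat) (m : List (List Int)) (rows cols : Nat) (h : pvRect m rows cols)
    (hn : n ≤ rows+1) (i' j' : Nat) :
    pvRect ((List.range n).foldl (fun m i => pvSet2 m i 0 (i:Int)) m) rows cols ∧
    pvGet2 ((List.range n).foldl (fun m i => pvSet2 m i 0 (i:Int)) m) i' j'
      = if j' = 0 ∧ i' < n then (i' : Int) else pvGet2 m i' j' := by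
  induction n with
  | zero => exact ⟨h, by simp⟩
  | succ n ih =>
    obtain ⟨hre, hge⟩ := ih (by omega)
    rw [List.range_succ, List.foldl_append, List.foldl_cons, List.foldl_nil]
    refine ⟨pvRect_set2 hre (by omega) 0 _, ?_⟩
    rw [pvGet2_set2 hre (by omega) (by omega) _ i' j', hge]
    split_ifs <;> first | rfl | omega

lemma pvInit2 (n : Nat) (m : List (List Int)) (rows cols : Nat) (h : pvRect m rows cols)
    (hn : n ≤ cols+1) (i' j' : Nat) :
    pvRect ((List.range n).foldl (fun m j => pvSet2 m 0 j (j:Int)) m) rows cols ∧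
    pvGet2 ((List.range n).foldl (fun m j => pvSet2 m 0 j (j:Int)) m) i' j'
      = if i' = 0 ∧ j' < n then (j' : Int) else pvGet2 m i' j' := by
  induction n with
  | zero => exact ⟨h, by simp⟩
  | succ n ih =>
    obtain ⟨hre, hge⟩ := ih (by omega)
    rw [List.range_succ, List.foldl_append, List.foldl_cons, List.foldl_nil]
    refine ⟨pvRect_set2 hre (by omega) n _, ?_⟩
    rw [pvGet2_set2 hre (by omega) (by omega) _ i' j', hge]
    split_ifs <;> first | rfl | omega

lemma pvFillRowSpec (reference hypothesis : List String) (im : Nat)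
    (m : List (List Int)) (hrect : pvRect m reference.length hypothesis.length)
    (him : im < reference.length)
    (hprev : ∀ j ≤ hypothesis.length, pvGet2 m im j = pvD reference hypothesis im j)
    (h0 : pvGet2 m (im+1) 0 = pvD reference hypothesis (im+1) 0) :
    ∀ n ≤ hypothesis.length,
      pvRect ((List.range n).foldl (pvFillCell reference hypothesis im) m)
        reference.length hypothesis.length
      ∧ (∀ j ≤ n, pvGet2 ((List.range n).foldl (pvFillCell reference hypothesis im) m) (im+1) j
          = pvD reference hypothesis (im+1) j)
      ∧ (∀ i' j', i' ≠ im+1 →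
          pvGet2 ((List.range n).foldl (pvFillCell reference hypothesis im) m) i' j'
            = pvGet2 m i' j') := by
  intro n
  induction n with
  | zero =>
    intro _
    refine ⟨hrect, ?_, fun _ _ _ => rfl⟩
    intro j hj
    interval_cases j
    simpa using h0
  | succ n ih =>
    intro hn
    obtain ⟨hre, hval, hunch⟩ := ih (by omega)
    rw [List.range_succ, List.foldl_append, List.foldl_cons, List.foldl_nil]
    set M := (List.range n).foldl (pvFillCell reference hypothesis im) m with hM
    have hcell : pvFillCell reference hypothesis im M n
        = pvSet2 M (im+1) (n+1)
            (min (min (pvGet2 M im (n+1) + 1) (pvGet2 M (im+1) n + 1))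
              (pvGet2 M im n
                + if reference.getD im "" = hypothesis.getD n "" then (0:Int) else 1)) := by
      simp [pvFillCell]
    have hv : (min (min (pvGet2 M im (n+1) + 1) (pvGet2 M (im+1) n + 1))
              (pvGet2 M im n
                + if reference.getD im "" = hypothesis.getD n "" then (0:Int) else 1))
        = pvD reference hypothesis (im+1) (n+1) := by
      rw [hunch im (n+1) (by omega), hunch im n (by omega), hval n (by omega),
          hprev (n+1) (by omega), hprev n (by omega), pvD_succ_succ]
    rw [hcell, hv]
    refine ⟨pvRect_set2 hre (by omega) _ _, ?_, ?_⟩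
    · intro j hj
      rw [pvGet2_set2 hre (by omega) (by omega)]
      by_cases hje : j = n+1
      · subst hje; simp
      · rw [if_neg (by omega)]
        exact hval j (by omega)
    · intro i' j' hne
      rw [pvGet2_set2 hre (by omega) (by omega), if_neg (by omega)]
      exact hunch i' j' hne

lemma pvFillSpec (reference hypothesis : List String) (m : List (List Int))
    (hrect : pvRect m reference.length hypothesis.length)
    (hrow0 : ∀ j ≤ hypothesis.length, pvGet2 m 0 j = pvD reference hypothesis 0 j)
    (hcol0 : ∀ i ≤ reference.length, pvGet2 m i 0 = pvD reference hypothesis i 0) :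
    ∀ i ≤ reference.length, ∀ j ≤ hypothesis.length,
      pvGet2 (pvFill reference hypothesis m) i j = pvD reference hypothesis i j := by
  have aux : ∀ k ≤ reference.length,
      pvRect ((List.range k).foldl (pvFillRow reference hypothesis) m)
        reference.length hypothesis.length
      ∧ (∀ i ≤ k, ∀ j ≤ hypothesis.length,
          pvGet2 ((List.range k).foldl (pvFillRow reference hypothesis) m) i j
            = pvD reference hypothesis i j)
      ∧ (∀ i' j', i' > k →
          pvGet2 ((List.range k).foldl (pvFillRow reference hypothesis) m) i' j'
            = pvGet2 m i' j') := by
    intro k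
    induction k with
    | zero =>
      intro _
      exact ⟨hrect, fun i hi j hj => by interval_cases i; exact hrow0 j hj,
        fun _ _ _ => rfl⟩
    | succ k ih =>
      intro hk
      obtain ⟨hre, hval, hunch⟩ := ih (by omega)
      rw [List.range_succ, List.foldl_append, List.foldl_cons, List.foldl_nil]
      set M := (List.range k).foldl (pvFillRow reference hypothesis) m with hM
      have hrowspec := pvFillRowSpec reference hypothesis k M hre (by omega)
        (fun j hj => hval k (by omega) j hj)
        (by
          rw [hunch (k+1) 0 (by omega)]
          exact hcol0 (k+1) (by omega))
        hypothesis.length (le_refl _)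
      obtain ⟨hre2, hval2, hunch2⟩ := hrowspec
      refine ⟨hre2, ?_, ?_⟩
      · intro i hi j hj
        by_cases hie : i = k+1
        · subst hie; exact hval2 j hj
        · rw [show pvFillRow reference hypothesis M k
              = (List.range hypothesis.length).foldl (pvFillCell reference hypothesis k) M
              from rfl] at *
          rw [hunch2 i j (by omega)]
          exact hval i (by omega) j hj
      · intro i' j' hi'
        rw [show pvFillRow reference hypothesis M k
            = (List.range hypothesis.length).foldl (pvFillCell reference hypothesis k) M
            from rfl]
        rw [hunch2 i' j' (by omega)]
        exact hunch i' j' (by omega)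
  intro i hi j hj
  exact (aux reference.length (le_refl _)).2.1 i hi j hj

-- the row of (distance, error list) cells B's invariant talks about
def pvRowMap (reference hypothesis : List String) (i : Nat) : List (Int × List Int) :=
  (List.range (hypothesis.length+1)).map
    (fun j => (pvD reference hypothesis i j, pvE reference hypothesis i j))

lemma pvRowMap_getD (reference hypothesis : List String) (i j : Nat)
    (hj : j ≤ hypothesis.length) :
    (pvRowMap reference hypothesis i).getD j (0, [])
      = (pvD reference hypothesis i j, pvE reference hypothesis i j) :=
  PySem.List.getD_map_range _ _ _ _ (by omega)

-- B's init loop builds row 0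
lemma pvInitRowB_spec (reference hypothesis : List String) :
    pvInitRowB hypothesis.length = pvRowMap reference hypothesis 0 := by
  have aux : ∀ n ≤ hypothesis.length,
      (List.range' 1 n).foldl
        (fun (prev : List (Int × List Int)) (j : Nat) =>
          prev ++ [((j : Int), ((j : Int) - 1) :: (prev.getD (j-1) (0, [])).2)])
        [((0 : Int), ([] : List Int))]
      = (List.range (n+1)).map
          (fun j => (pvD reference hypothesis 0 j, pvE reference hypothesis 0 j)) := by
    intro n
    induction n with
    | zero => intro _; simp [pvD_zero, pvE_zero_zero]
    | succ n ih =>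
      intro hn
      rw [List.range'_concat, List.foldl_append, ih (by omega), List.foldl_cons,
        List.foldl_nil]
      simp only [Nat.one_mul, Nat.add_comm 1 n, Nat.add_sub_cancel]
      have hget : ((List.range (n+1)).map
            (fun j => (pvD reference hypothesis 0 j, pvE reference hypothesis 0 j))).getD
            n (0, [])
          = (pvD reference hypothesis 0 n, pvE reference hypothesis 0 n) :=
        PySem.List.getD_map_range _ _ _ _ (by omega)
      rw [hget, show List.range (n+1+1) = List.range (n+1) ++ [n+1] from List.range_succ,
        List.map_append]
      congr 1
      simp only [List.map_cons, List.map_nil, pvD_zero, pvE_zero_succ]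
      rw [show ((n+1 : Nat) : Int) - 1 = (n : Int) by push_cast; ring]
  unfold pvInitRowB pvRowMap
  exact aux hypothesis.length (le_refl _)

-- B's inner loop turns row k into row k+1
lemma pvRowB_spec (reference hypothesis : List String) (k : Nat) (hk : k < reference.length) :
    ∀ n ≤ hypothesis.length,
      (List.range n).foldl
        (pvRowBCell hypothesis (reference.getD k "") (pvRowMap reference hypothesis k))
        [(((k : Int) + 1), ([] : List Int))]
      = (List.range (n+1)).map
          (fun j => (pvD reference hypothesis (k+1) j, pvE reference hypothesis (k+1) j)) := by
  intro n
  induction n with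
  | zero =>
    intro _
    rw [List.range_zero, List.foldl_nil, List.range_one]
    simp only [List.map_cons, List.map_nil]
    rw [pvD_succ_zero, pvE_succ_zero]
  | succ n ih =>
    intro hn
    rw [List.range_succ, List.foldl_append, List.foldl_cons, List.foldl_nil, ih (by omega)]
    have hd := pvRowMap_getD reference hypothesis k n (by omega)
    have hu := pvRowMap_getD reference hypothesis k (n+1) (by omega)
    have hl : ((List.range (n+1)).map
          (fun j => (pvD reference hypothesis (k+1) j, pvE reference hypothesis (k+1) j))).getD
          n (0, [])
        = (pvD reference hypothesis (k+1) n, pvE reference hypothesis (k+1) n) :=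
      PySem.List.getD_map_range _ _ _ _ (by omega)
    rw [show List.range (n+1+1) = List.range (n+1) ++ [n+1] from List.range_succ,
      List.map_append]
    simp only [List.map_cons, List.map_nil]
    simp only [pvRowBCell, Nat.add_sub_cancel]
    rw [hd, hu, hl]
    have hcast : ((n+1 : Nat) : Int) - 1 = (n : Int) := by push_cast; ring
    by_cases heq : reference.getD k "" = hypothesis.getD n ""
    · rw [if_pos heq]
      congr 1
      rw [pvD_diag_eq reference hypothesis k n heq, pvE_succ_succ, if_pos heq]
    · rw [if_neg heq]
      have hbest := pvD_mismatch reference hypothesis k n heq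
      have he := pvE_succ_succ reference hypothesis k n
      rw [if_neg heq] at he
      split_ifs with h1 h2
      · congr 1
        rw [he, if_pos h1, hcast, hbest]
      · congr 1
        rw [he, if_neg h1, if_pos h2, hcast, hbest]
      · congr 1
        rw [he, if_neg h1, if_neg h2, hbest]

-- the outer fold over the enumerated reference reaches the last row
lemma pvOuterFold (reference hypothesis : List String) :
    ∀ (l : List String) (k : Nat), k ≤ reference.length → reference.drop k = l →
      (PySem.List.enumerate l ((k : Int) + 1)).foldl
        (fun prev (p : Int × String) =>
          (List.range hypothesis.length).foldl (pvRowBCell hypothesis p.2 prev)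
            [(p.1, ([] : List Int))])
        (pvRowMap reference hypothesis k)
      = pvRowMap reference hypothesis reference.length := by
  intro l
  induction l with
  | nil =>
    intro k _hk hdrop
    have : reference.length ≤ k := List.drop_eq_nil_iff.mp hdrop
    have hke : k = reference.length := by omega
    subst hke
    simp [PySem.List.enumerate]
  | cons tok l' ih =>
    intro k hk hdrop
    clear hk
    have hlen : reference.length - k = l'.length + 1 := by
      have := congrArg List.length hdrop
      simpa using this
    have hklt : k < reference.length := by omega
    have htok : reference.getD k "" = tok := by
      have h1 : reference[k]? = some tok := by
        rw [← List.head?_drop, hdrop]; rfl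
      rw [List.getD_eq_getElem?_getD, h1]; rfl
    have hdrop' : reference.drop (k+1) = l' := by
      have h2 : List.drop 1 (reference.drop k) = reference.drop (k+1) := List.drop_drop ..
      rw [← h2, hdrop]
      rfl
    rw [PySem.List.enumerate_cons, List.foldl_cons]
    simp only
    rw [← htok,
      pvRowB_spec reference hypothesis k hklt hypothesis.length (le_refl _)]
    have hcast : ((k : Int) + 1) + 1 = ((k+1 : Nat) : Int) + 1 := by push_cast; ring
    rw [show ((List.range (hypothesis.length+1)).map
        (fun j => (pvD reference hypothesis (k+1) j, pvE reference hypothesis (k+1) j)))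
        = pvRowMap reference hypothesis (k+1) from rfl, hcast]
    exact ih (k+1) (by omega) hdrop'

-- A's backtrack performs exactly the adds listed in pvE, in order
lemma pvBackEq (reference hypothesis : List String) (dp : List (List Int))
    (hdp : ∀ i ≤ reference.length, ∀ j ≤ hypothesis.length,
        pvGet2 dp i j = pvD reference hypothesis i j) :
    ∀ n i j s, i + j ≤ n → i ≤ reference.length → j ≤ hypothesis.length →
      pvABack dp reference hypothesis i j s
        = (pvE reference hypothesis i j).foldl PySem.Set.add s := by
  intro n
  induction n with
  | zero =>
    intro i j s hf hi hj
    have hi0 : i = 0 := by omega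
    have hj0 : j = 0 := by omega
    subst hi0; subst hj0
    rw [pvABack, pvE_zero_zero]
    simp
  | succ n ih =>
    intro i j s hf hi hj
    by_cases h00 : i = 0 ∧ j = 0
    · obtain ⟨rfl, rfl⟩ := h00
      rw [pvABack, pvE_zero_zero]
      simp
    · have hor : i > 0 ∨ j > 0 := by omega
      rw [pvABack, dif_pos hor]
      rcases Nat.eq_zero_or_pos i with hi0 | hipos
      · subst hi0
        have hj1 : 0 < j := by omega
        obtain ⟨j', rfl⟩ : ∃ j', j = j'+1 := ⟨j-1, by omega⟩
        have e1 : pvGet2 dp 0 (j'+1) = ((j'+1 : Nat):Int) := by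
          rw [hdp 0 (by omega) (j'+1) hj, pvD_zero]
        have e2 : pvGet2 dp 0 (j'+1-1) = ((j' : Nat):Int) := by
          simpa using by rw [hdp 0 (by omega) j' (by omega), pvD_zero]
        rw [dif_neg (show ¬((0:Nat) > 0 ∧ j'+1 > 0) by omega),
          dif_pos (show j'+1 > 0 ∧ pvGet2 dp 0 (j'+1) = pvGet2 dp 0 (j'+1-1) + 1 from
            ⟨by omega, by rw [e1, e2]; push_cast; ring⟩)]
        rw [pvE_zero_succ, List.foldl_cons,
          show ((j'+1 : Nat) : Int) - 1 = (j' : Int) by push_cast; ring]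
        exact ih 0 j' _ (by omega) (by omega) (by omega)
      · rcases Nat.eq_zero_or_pos j with hj0 | hjpos
        · subst hj0
          obtain ⟨i', rfl⟩ : ∃ i', i = i'+1 := ⟨i-1, by omega⟩
          have e1 : pvGet2 dp (i'+1) 0 = ((i'+1 : Nat):Int) := by
            rw [hdp (i'+1) hi 0 (by omega), pvD_col0]
          have e2 : pvGet2 dp (i'+1-1) 0 = ((i' : Nat):Int) := by
            simpa using by rw [hdp i' (by omega) 0 (by omega), pvD_col0]
          rw [dif_neg (show ¬(i'+1 > 0 ∧ (0:Nat) > 0) by omega),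
            dif_neg (show ¬((0:Nat) > 0 ∧ pvGet2 dp (i'+1) 0 = pvGet2 dp (i'+1) (0-1) + 1) by
              intro hcon; omega),
            dif_pos (show i'+1 > 0 ∧ pvGet2 dp (i'+1) 0 = pvGet2 dp (i'+1-1) 0 + 1 from
              ⟨by omega, by rw [e1, e2]; push_cast; ring⟩)]
          rw [pvE_succ_zero, List.foldl_nil]
          have := ih i' 0 s (by omega) (by omega) (by omega)
          rw [pvE_col0, List.foldl_nil] at this
          simpa using this
        · obtain ⟨i', rfl⟩ : ∃ i', i = i'+1 := ⟨i-1, by omega⟩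
          obtain ⟨j', rfl⟩ : ∃ j', j = j'+1 := ⟨j-1, by omega⟩
          have e0 : pvGet2 dp (i'+1) (j'+1) = pvD reference hypothesis (i'+1) (j'+1) :=
            hdp _ hi _ hj
          have ed : pvGet2 dp (i'+1-1) (j'+1-1) = pvD reference hypothesis i' j' := by
            simpa using hdp i' (by omega) j' (by omega)
          have el : pvGet2 dp (i'+1) (j'+1-1) = pvD reference hypothesis (i'+1) j' := by
            simpa using hdp (i'+1) hi j' (by omega)
          have eu : pvGet2 dp (i'+1-1) (j'+1) = pvD reference hypothesis i' (j'+1) := by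
            simpa using hdp i' (by omega) (j'+1) hj
          rw [dif_pos (show i'+1 > 0 ∧ j'+1 > 0 by omega)]
          have hcast : ((j'+1 : Nat) : Int) - 1 = (j' : Int) := by push_cast; ring
          by_cases heq : reference.getD (i'+1-1) "" = hypothesis.getD (j'+1-1) ""
          · have heq' : reference.getD i' "" = hypothesis.getD j' "" := by
              simpa using heq
            rw [if_pos heq]
            have hdiag := pvD_diag_eq reference hypothesis i' j' heq'
            rw [if_pos (show pvGet2 dp (i'+1) (j'+1) = pvGet2 dp (i'+1-1) (j'+1-1) + 0 by
              rw [e0, ed, hdiag]; ring), if_neg (by simp)]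
            rw [pvE_succ_succ, if_pos heq']
            exact ih i' j' _ (by omega) (by omega) (by omega)
          · have heq' : ¬ reference.getD i' "" = hypothesis.getD j' "" := by
              simpa using heq
            rw [if_neg heq]
            have hbest := pvD_mismatch reference hypothesis i' j' heq'
            have he := pvE_succ_succ reference hypothesis i' j'
            rw [if_neg heq'] at he
            by_cases hdc : pvD reference hypothesis (i'+1) (j'+1)
                = pvD reference hypothesis i' j' + 1
            · rw [if_pos (show pvGet2 dp (i'+1) (j'+1) = pvGet2 dp (i'+1-1) (j'+1-1) + 1 by
                rw [e0, ed]; exact hdc)]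
              rw [if_pos (show (1:Int) ≠ 0 by norm_num)]
              rw [he, if_pos (by omega), List.foldl_cons, hcast]
              exact ih i' j' _ (by omega) (by omega) (by omega)
            · rw [if_neg (show ¬(pvGet2 dp (i'+1) (j'+1) = pvGet2 dp (i'+1-1) (j'+1-1) + 1) by
                rw [e0, ed]; exact hdc)]
              by_cases hlc : pvD reference hypothesis (i'+1) (j'+1)
                  = pvD reference hypothesis (i'+1) j' + 1
              · rw [dif_pos (show j'+1 > 0 ∧
                    pvGet2 dp (i'+1) (j'+1) = pvGet2 dp (i'+1) (j'+1-1) + 1 from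
                  ⟨by omega, by rw [e0, el]; exact hlc⟩)]
                rw [he, if_neg (by omega), if_pos (by omega), List.foldl_cons, hcast]
                exact ih (i'+1) j' _ (by omega) (by omega) (by omega)
              · have huc : pvD reference hypothesis (i'+1) (j'+1)
                    = pvD reference hypothesis i' (j'+1) + 1 := by omega
                rw [dif_neg (show ¬(j'+1 > 0 ∧
                    pvGet2 dp (i'+1) (j'+1) = pvGet2 dp (i'+1) (j'+1-1) + 1) by
                  intro hcon
                  exact hlc (by rw [← e0, ← el]; exact hcon.2)),
                  dif_pos (show i'+1 > 0 ∧
                    pvGet2 dp (i'+1) (j'+1) = pvGet2 dp (i'+1-1) (j'+1) + 1 from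
                  ⟨by omega, by rw [e0, eu]; exact huc⟩)]
                rw [he, if_neg (by omega), if_neg (by omega)]
                exact ih i' (j'+1) _ (by omega) (by omega) (by omega)

-- ===== VERDICT (by name: the statement is the Claim_ definition above) =====
theorem error_hypothesis_indices_py_spec : Claim_equal_error_hypothesis_indices_py := by
  unfold Claim_equal_error_hypothesis_indices_py
  intro reference hypothesis _
  unfold Spec_error_hypothesis_indices_py
  show pvABack
      (pvFill reference hypothesis
        ((List.range (hypothesis.length+1)).foldl (fun m j => pvSet2 m 0 j (j:Int))
          ((List.range (reference.length+1)).foldl (fun m i => pvSet2 m i 0 (i:Int))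
            (List.replicate (reference.length+1) (List.replicate (hypothesis.length+1) 0)))))
      reference hypothesis reference.length hypothesis.length PySem.Set.empty
    = ((((PySem.List.enumerate reference 1).foldl
        (fun prev (p : Int × String) =>
          (List.range hypothesis.length).foldl (pvRowBCell hypothesis p.2 prev)
            [(p.1, ([] : List Int))])
        (pvInitRowB hypothesis.length)).getD hypothesis.length (0, [])).2).foldl
        PySem.Set.add PySem.Set.empty
  have hrect0 : pvRect (List.replicate (reference.length+1)
      (List.replicate (hypothesis.length+1) (0:Int))) reference.length hypothesis.length := by
    refine ⟨by simp, ?_⟩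
    intro r hr
    rw [List.eq_of_mem_replicate hr]
    simp
  have h1 := fun i' j' => pvInit1 (reference.length+1) _ reference.length hypothesis.length
    hrect0 (le_refl _) i' j'
  have hr1 := (h1 0 0).1
  have h2 := fun i' j' => pvInit2 (hypothesis.length+1) _ reference.length hypothesis.length
    hr1 (le_refl _) i' j'
  have hr2 := (h2 0 0).1
  have hrow0 : ∀ j ≤ hypothesis.length,
      pvGet2 ((List.range (hypothesis.length+1)).foldl (fun m j => pvSet2 m 0 j (j:Int))
        ((List.range (reference.length+1)).foldl (fun m i => pvSet2 m i 0 (i:Int))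
          (List.replicate (reference.length+1) (List.replicate (hypothesis.length+1) 0)))) 0 j
        = pvD reference hypothesis 0 j := by
    intro j hj
    rw [(h2 0 j).2, if_pos ⟨rfl, by omega⟩, pvD_zero]
  have hcol0 : ∀ i ≤ reference.length,
      pvGet2 ((List.range (hypothesis.length+1)).foldl (fun m j => pvSet2 m 0 j (j:Int))
        ((List.range (reference.length+1)).foldl (fun m i => pvSet2 m i 0 (i:Int))
          (List.replicate (reference.length+1) (List.replicate (hypothesis.length+1) 0)))) i 0
        = pvD reference hypothesis i 0 := by
    intro i hi
    rw [pvD_col0, (h2 i 0).2]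
    by_cases hi0 : i = 0
    · subst hi0
      rw [if_pos ⟨rfl, by omega⟩]
    · rw [if_neg (by omega), (h1 i 0).2, if_pos ⟨rfl, by omega⟩]
  have hdp := pvFillSpec reference hypothesis _ hr2 hrow0 hcol0
  rw [pvInitRowB_spec reference hypothesis,
    show (1 : Int) = ((0 : Nat) : Int) + 1 by norm_num,
    pvOuterFold reference hypothesis reference 0 (by omega) rfl,
    pvRowMap_getD reference hypothesis reference.length hypothesis.length (le_refl _)]
  exact pvBackEq reference hypothesis _ hdp (reference.length + hypothesis.length)
    reference.length hypothesis.length PySem.Set.empty (le_refl _) (le_refl _) (le_refl _)
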